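-- pv_equiv track=rewrite | github.com/joyful-young/OnlineJudge | 백준/Gold/9205. 맥주 마시면서 걸어가기/맥주 마시면서 걸어가기.py | bfs
-- ===== SOURCE A (Python) =====
-- from collections import deque
--
-- DIST = 20 * 50
--
-- def get_dist(start, end):
--     return abs(start[0] - end[0]) + abs(start[1] - end[1])
--
-- def bfs(home, cs, goal):
--     # 맥주 20개 있을 때, 다음 편의점을 1000m 안에 가면 됨
--
--     # 도착지에 바로 갈 수 있을 경우
--     if get_dist(home, goal) <= DIST:
--         return "happy"
--
--
--     # 편의점별 방문 여부
--     store_cnt = len(cs)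
--     visited = [0 for _ in range(store_cnt)]
--     q = deque([home])
--
--     while q:
--         v = q.popleft()
--
--         if get_dist(v, goal) <= DIST:
--             return "happy"
--
--         for i in range(store_cnt):
--             if visited[i] == 0 and get_dist(v, cs[i]) <= DIST:
--                 q.append(cs[i])
--                 visited[i] = 1
--     return "sad"
-- ===== SOURCE B (Python) =====
-- DIST = 20 * 50
--
-- def get_dist(start, end):
--     return abs(start[0] - end[0]) + abs(start[1] - end[1])
--
-- def bfs(home, cs, goal):
--     # connected-component labelling: merge labels of every pair of nodes
--     # within DIST until stable; happy iff home and goal share a label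
--     nodes = [home, goal] + list(cs)
--     n = len(nodes)
--     labels = list(range(n))
--     changed = True
--     while changed:
--         changed = False
--         for i in range(n):
--             for j in range(i + 1, n):
--                 if get_dist(nodes[i], nodes[j]) <= DIST:
--                     m = min(labels[i], labels[j])
--                     if labels[i] != m or labels[j] != m:
--                         labels[i] = m
--                         labels[j] = m
--                         changed = True
--     return "happy" if labels[0] == labels[1] else "sad"
-- ===== Notes on version B (the rewrite author's own statement) =====
-- stated objective: alternative
-- what changed: Replaces A's deque BFS with visited flags by union-find-style connected-component label merging: all pairs among [home, goal] + stores within 1000m get their labels merged to the minimum until stable, and the answer is 'happy' iff home and goal end up with the same label.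
import Mathlib
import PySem

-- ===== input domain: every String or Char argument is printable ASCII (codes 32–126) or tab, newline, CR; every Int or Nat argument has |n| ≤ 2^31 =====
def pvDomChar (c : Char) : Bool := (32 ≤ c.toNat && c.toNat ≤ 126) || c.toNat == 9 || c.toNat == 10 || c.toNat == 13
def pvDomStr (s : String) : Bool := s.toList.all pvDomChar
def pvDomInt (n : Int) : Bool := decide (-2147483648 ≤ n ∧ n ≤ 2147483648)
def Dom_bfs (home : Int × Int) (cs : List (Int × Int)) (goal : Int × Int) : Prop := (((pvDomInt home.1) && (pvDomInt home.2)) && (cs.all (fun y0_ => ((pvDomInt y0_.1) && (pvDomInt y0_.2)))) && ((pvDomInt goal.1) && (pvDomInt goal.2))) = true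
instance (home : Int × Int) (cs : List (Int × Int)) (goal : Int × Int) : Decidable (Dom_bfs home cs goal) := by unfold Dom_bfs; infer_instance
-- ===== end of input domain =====

-- B replaces A's queue-based BFS by connected-component label merging over all
-- node pairs within 1000m (union-find style), same "happy"/"sad" answer; objective: alternative.

-- ===== PORT A =====
-- DIST = 20 * 50
def pvDIST : Int := 20 * 50

-- get_dist(start, end) = abs manhattan distance
def pvGetDist (s e : Int × Int) : Int := |s.1 - e.1| + |s.2 - e.2|

-- the body of A's inner `for i in range(store_cnt)` loop: state (q, visited)
def pvScanStep (v : Int × Int) (cs : List (Int × Int))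
    (st : List (Int × Int) × List Int) (i : Nat) : List (Int × Int) × List Int :=
  if st.2.getD i 0 = 0 ∧ pvGetDist v (cs.getD i (0, 0)) ≤ pvDIST then
    (st.1 ++ [cs.getD i (0, 0)], st.2.set i 1)
  else st

-- A's `while q:` loop; fuel is an upper bound on the number of iterations
-- (each iteration pops one element and strictly decreases q.length + #unvisited).
def pvBfsLoop (cs : List (Int × Int)) (goal : Int × Int) :
    Nat → List (Int × Int) → List Int → String
  | 0, _, _ => "sad"
  | fuel + 1, q, visited =>
    match q with
    | [] => "sad"
    | v :: q' =>
      if pvGetDist v goal ≤ pvDIST then "happy"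
      else
        let st := (List.range cs.length).foldl (pvScanStep v cs) (q', visited)
        pvBfsLoop cs goal fuel st.1 st.2

def bfs (home : Int × Int) (cs : List (Int × Int)) (goal : Int × Int) : String :=
  if pvGetDist home goal ≤ pvDIST then "happy"
  else
    pvBfsLoop cs goal (cs.length + 2) [home] (List.replicate cs.length 0)

-- ===== PORT B =====
-- one pass of B's double loop `for i in range(n): for j in range(i+1, n):`
def pvSweep (nodes : List (Int × Int)) (labels : List Int) : List Int × Bool :=
  (List.range nodes.length).foldl
    (fun st i =>
      (List.range' (i + 1) (nodes.length - (i + 1))).foldl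
        (fun st j =>
          if pvGetDist (nodes.getD i (0, 0)) (nodes.getD j (0, 0)) ≤ pvDIST then
            let m := min (st.1.getD i 0) (st.1.getD j 0)
            if st.1.getD i 0 ≠ m ∨ st.1.getD j 0 ≠ m then
              ((st.1.set i m).set j m, true)
            else st
          else st)
        st)
    (labels, false)

-- B's `while changed:` loop; fuel is an upper bound on the number of changing
-- sweeps (each changing sweep strictly decreases the label sum).
def pvLpLoop (nodes : List (Int × Int)) : Nat → List Int → List Int
  | 0, labels => labels
  | fuel + 1, labels =>
    let st := pvSweep nodes labels
    if st.2 then pvLpLoop nodes fuel st.1 else labels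

def bfs_alt (home : Int × Int) (cs : List (Int × Int)) (goal : Int × Int) : String :=
  let nodes := home :: goal :: cs
  let n := nodes.length
  let labels := pvLpLoop nodes (n * n + 1) ((List.range n).map (fun i : Nat => (i : Int)))
  if labels.getD 0 0 = labels.getD 1 0 then "happy" else "sad"

-- ===== PRECONDITION & SPEC =====
def Spec_bfs (home : Int × Int) (cs : List (Int × Int)) (goal : Int × Int) (out : String) : Prop := out = bfs_alt home cs goal
instance (home : Int × Int) (cs : List (Int × Int)) (goal : Int × Int) (out : String) : Decidable (Spec_bfs home cs goal out) := by unfold Spec_bfs; infer_instance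

-- ===== CLAIM (what is proved, stated in full; the proofs are below) =====
def Claim_equal_bfs : Prop := ∀ (home : Int × Int) (cs : List (Int × Int)) (goal : Int × Int), Dom_bfs home cs goal → Spec_bfs home cs goal (bfs home cs goal)

-- ===== LEMMAS AND PROOFS =====

-- The common specification: x is reachable from home stepping only through
-- stores at distance ≤ 1000, and some reachable point is within 1000 of goal.
def pvStep (cs : List (Int × Int)) (u w : Int × Int) : Prop :=
  w ∈ cs ∧ pvGetDist u w ≤ pvDIST

def pvGS (home : Int × Int) (cs : List (Int × Int)) (goal : Int × Int) : Prop :=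
  ∃ x, Relation.ReflTransGen (pvStep cs) home x ∧ pvGetDist x goal ≤ pvDIST

theorem pvGetDist_comm (a b : Int × Int) : pvGetDist a b = pvGetDist b a := by
  simp [pvGetDist, abs_sub_comm]


-- ---------- small getD/set helpers ----------

theorem pvGetD_set_ne (l : List Int) (i j : Nat) (m : Int) (h : i ≠ j) :
    (l.set i m).getD j 0 = l.getD j 0 := by
  simp [List.getD, List.getElem?_set, h]

theorem pvGetD_set_self (l : List Int) (i : Nat) (m : Int) (h : i < l.length) :
    (l.set i m).getD i 0 = m := by
  simp [List.getD, List.getElem?_set, h]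

theorem pvGetD_oob (l : List Int) (i : Nat) (h : l.length ≤ i) : l.getD i 0 = 0 := by
  simp [List.getD, List.getElem?_eq_none (by omega : l.length ≤ i)]

theorem pvGetD_mem {α : Type} (l : List α) (i : Nat) (d : α) (h : i < l.length) :
    l.getD i d ∈ l := by
  rw [List.getD_eq_getElem l d h]; exact List.getElem_mem h

-- ---------- A-side: facts about one scan of the store list ----------

theorem pvScanStep_cases (v : Int × Int) (cs : List (Int × Int))
    (st : List (Int × Int) × List Int) (i : Nat) :
    (st.2.getD i 0 = 0 ∧ pvGetDist v (cs.getD i (0, 0)) ≤ pvDIST ∧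
      pvScanStep v cs st i = (st.1 ++ [cs.getD i (0, 0)], st.2.set i 1)) ∨
    (¬ (st.2.getD i 0 = 0 ∧ pvGetDist v (cs.getD i (0, 0)) ≤ pvDIST) ∧
      pvScanStep v cs st i = st) := by
  by_cases h : st.2.getD i 0 = 0 ∧ pvGetDist v (cs.getD i (0, 0)) ≤ pvDIST
  · exact Or.inl ⟨h.1, h.2, by unfold pvScanStep; rw [if_pos h]⟩
  · exact Or.inr ⟨h, by unfold pvScanStep; rw [if_neg h]⟩

theorem pvScan_len (v : Int × Int) (cs : List (Int × Int)) :
    ∀ (is' : List Nat) (q : List (Int × Int)) (vis : List Int),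
      (is'.foldl (pvScanStep v cs) (q, vis)).2.length = vis.length := by
  intro is'
  induction is' with
  | nil => intro q vis; rfl
  | cons i it ih =>
    intro q vis
    simp only [List.foldl_cons]
    rcases pvScanStep_cases v cs (q, vis) i with ⟨_, _, heq⟩ | ⟨_, heq⟩ <;> rw [heq]
    · rw [ih]; simp
    · exact ih _ _

theorem pvScan_sub (v : Int × Int) (cs : List (Int × Int)) :
    ∀ (is' : List Nat) (q : List (Int × Int)) (vis : List Int) (x : Int × Int),
      x ∈ q → x ∈ (is'.foldl (pvScanStep v cs) (q, vis)).1 := by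
  intro is'
  induction is' with
  | nil => intro q vis x hx; exact hx
  | cons i it ih =>
    intro q vis x hx
    simp only [List.foldl_cons]
    rcases pvScanStep_cases v cs (q, vis) i with ⟨_, _, heq⟩ | ⟨_, heq⟩ <;> rw [heq]
    · exact ih _ _ _ (by simp [hx])
    · exact ih _ _ _ hx

theorem pvScan_mem (v : Int × Int) (cs : List (Int × Int)) :
    ∀ (is' : List Nat) (q : List (Int × Int)) (vis : List Int),
      (∀ i ∈ is', i < cs.length) →
      ∀ x ∈ (is'.foldl (pvScanStep v cs) (q, vis)).1,
        x ∈ q ∨ (x ∈ cs ∧ pvGetDist v x ≤ pvDIST) := by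
  intro is'
  induction is' with
  | nil => intro q vis _ x hx; exact Or.inl hx
  | cons i it ih =>
    intro q vis hlt x hx
    simp only [List.foldl_cons] at hx
    have hi : i < cs.length := hlt i (by simp)
    rcases pvScanStep_cases v cs (q, vis) i with ⟨h0, hd, heq⟩ | ⟨_, heq⟩ <;> rw [heq] at hx
    · rcases ih _ _ (fun j hj => hlt j (by simp [hj])) x hx with h | h
      · rcases List.mem_append.1 h with h | h
        · exact Or.inl h
        · simp only [List.mem_singleton] at h
          subst h
          exact Or.inr ⟨pvGetD_mem _ _ _ hi, hd⟩
      · exact Or.inr h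
    · exact ih _ _ (fun j hj => hlt j (by simp [hj])) x hx

theorem pvScan_zero (v : Int × Int) (cs : List (Int × Int)) :
    ∀ (is' : List Nat) (q : List (Int × Int)) (vis : List Int) (i : Nat),
      vis.getD i 0 = 0 →
      (is'.foldl (pvScanStep v cs) (q, vis)).2.getD i 0 = 0 ∨
        cs.getD i (0, 0) ∈ (is'.foldl (pvScanStep v cs) (q, vis)).1 := by
  intro is'
  induction is' with
  | nil => intro q vis i h; exact Or.inl h
  | cons i0 it ih =>
    intro q vis i h
    simp only [List.foldl_cons]
    rcases pvScanStep_cases v cs (q, vis) i0 with ⟨h0, hd, heq⟩ | ⟨_, heq⟩ <;> rw [heq]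
    · by_cases hii : i0 = i
      · subst hii
        exact Or.inr (pvScan_sub v cs it _ _ _ (by simp))
      · exact ih _ _ i (by rw [pvGetD_set_ne _ _ _ _ hii]; exact h)
    · exact ih _ _ i h

theorem pvScan_proc (v : Int × Int) (cs : List (Int × Int)) :
    ∀ (is' : List Nat) (q : List (Int × Int)) (vis : List Int) (i : Nat),
      i ∈ is' → vis.getD i 0 = 0 → pvGetDist v (cs.getD i (0, 0)) ≤ pvDIST →
      cs.getD i (0, 0) ∈ (is'.foldl (pvScanStep v cs) (q, vis)).1 := by
  intro is'
  induction is' with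
  | nil => intro q vis i h; simp at h
  | cons i0 it ih =>
    intro q vis i hmem h0 hd
    simp only [List.foldl_cons]
    by_cases hii : i = i0
    · subst hii
      rcases pvScanStep_cases v cs (q, vis) i with ⟨_, _, heq⟩ | ⟨hnc, _⟩
      · rw [heq]
        exact pvScan_sub v cs it _ _ _ (by simp)
      · exact absurd ⟨h0, hd⟩ hnc
    · have hit : i ∈ it := by
        rcases List.mem_cons.1 hmem with h | h
        · exact absurd h hii
        · exact h
      rcases pvScanStep_cases v cs (q, vis) i0 with ⟨_, _, heq⟩ | ⟨_, heq⟩ <;> rw [heq]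
      · exact ih _ _ i hit (by rw [pvGetD_set_ne _ _ _ _ (fun h => hii h.symm)]; exact h0) hd
      · exact ih _ _ i hit h0 hd

def pvZ (l : List Int) : Nat := l.countP (fun x => x == 0)

theorem pvZ_set (l : List Int) : ∀ (i : Nat), i < l.length → l.getD i 0 = 0 →
    pvZ (l.set i 1) + 1 = pvZ l := by
  induction l with
  | nil => intro i h; simp at h
  | cons a t ih =>
    intro i hi h0
    cases i with
    | zero =>
      simp only [List.getD_cons_zero] at h0
      subst h0
      simp [pvZ, List.countP_cons]
    | succ i =>
      simp only [List.getD_cons_succ] at h0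
      have := ih i (by simpa using hi) h0
      simp only [List.set_cons_succ, pvZ, List.countP_cons] at *
      omega

theorem pvScan_measure (v : Int × Int) (cs : List (Int × Int)) :
    ∀ (is' : List Nat) (q : List (Int × Int)) (vis : List Int),
      (∀ i ∈ is', i < vis.length) →
      (is'.foldl (pvScanStep v cs) (q, vis)).1.length +
        pvZ (is'.foldl (pvScanStep v cs) (q, vis)).2 = q.length + pvZ vis := by
  intro is'
  induction is' with
  | nil => intro q vis _; rfl
  | cons i it ih =>
    intro q vis hlt
    simp only [List.foldl_cons]
    have hi : i < vis.length := hlt i (by simp)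
    rcases pvScanStep_cases v cs (q, vis) i with ⟨h0, hd, heq⟩ | ⟨_, heq⟩ <;> rw [heq]
    · dsimp only
      have hZ : pvZ (vis.set i 1) + 1 = pvZ vis := pvZ_set vis i hi h0
      have := ih (q ++ [cs.getD i (0, 0)]) (vis.set i 1)
        (fun j hj => by rw [List.length_set]; exact hlt j (by simp [hj]))
      simp only [List.length_append, List.length_singleton] at this
      omega
    · exact ih _ _ (fun j hj => hlt j (by simp [hj]))

-- reachability through currently-unvisited stores from the queue
inductive pvRch (cs : List (Int × Int)) (q : List (Int × Int)) (vis : List Int) :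
    (Int × Int) → Prop
  | base (x : Int × Int) : x ∈ q → pvRch cs q vis x
  | step (y : Int × Int) (i : Nat) : pvRch cs q vis y → i < cs.length →
      vis.getD i 0 = 0 → pvGetDist y (cs.getD i (0, 0)) ≤ pvDIST →
      pvRch cs q vis (cs.getD i (0, 0))

theorem pvRch_nil (cs : List (Int × Int)) (vis : List Int) (x : Int × Int) :
    pvRch cs [] vis x → False := by
  intro h
  induction h with
  | base x hx => simp at hx
  | step y i _ _ _ _ ih => exact ih

theorem pvRch_transfer (cs : List (Int × Int)) (v : Int × Int) (q : List (Int × Int))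
    (vis : List Int) (x : Int × Int)
    (h : pvRch cs (v :: q) vis x) :
    x = v ∨ pvRch cs ((List.range cs.length).foldl (pvScanStep v cs) (q, vis)).1
      ((List.range cs.length).foldl (pvScanStep v cs) (q, vis)).2 x := by
  induction h with
  | base x hx =>
    rcases List.mem_cons.1 hx with h | h
    · exact Or.inl h
    · exact Or.inr (pvRch.base x (pvScan_sub v cs _ _ _ _ h))
  | step y i hy hi h0 hd ih =>
    rcases ih with hyv | hR
    · rw [hyv] at hd
      exact Or.inr (pvRch.base _ (pvScan_proc v cs _ _ _ i (by simp [hi]) h0 hd))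
    · rcases pvScan_zero v cs (List.range cs.length) q vis i h0 with hz | hm
      · exact Or.inr (pvRch.step y i hR hi hz hd)
      · exact Or.inr (pvRch.base _ hm)

theorem pvBfsLoop_zero (cs : List (Int × Int)) (goal : Int × Int) (q : List (Int × Int))
    (vis : List Int) : pvBfsLoop cs goal 0 q vis = "sad" := rfl

theorem pvBfsLoop_nilq (cs : List (Int × Int)) (goal : Int × Int) (fuel : Nat)
    (vis : List Int) : pvBfsLoop cs goal (fuel + 1) [] vis = "sad" := rfl

theorem pvBfsLoop_cons (cs : List (Int × Int)) (goal : Int × Int) (fuel : Nat)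
    (v : Int × Int) (q' : List (Int × Int)) (vis : List Int) :
    pvBfsLoop cs goal (fuel + 1) (v :: q') vis =
      if pvGetDist v goal ≤ pvDIST then "happy"
      else
        pvBfsLoop cs goal fuel
          ((List.range cs.length).foldl (pvScanStep v cs) (q', vis)).1
          ((List.range cs.length).foldl (pvScanStep v cs) (q', vis)).2 := rfl

theorem pvBfsLoop_out (cs : List (Int × Int)) (goal : Int × Int) :
    ∀ (fuel : Nat) (q : List (Int × Int)) (vis : List Int),
      pvBfsLoop cs goal fuel q vis = "happy" ∨ pvBfsLoop cs goal fuel q vis = "sad" := by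
  intro fuel
  induction fuel with
  | zero => intro q vis; exact Or.inr rfl
  | succ fuel ih =>
    intro q vis
    cases q with
    | nil => exact Or.inr rfl
    | cons v q' =>
      rw [pvBfsLoop_cons]
      by_cases h : pvGetDist v goal ≤ pvDIST
      · rw [if_pos h]; exact Or.inl rfl
      · rw [if_neg h]; exact ih _ _

theorem pvBfsLoop_happy (home : Int × Int) (cs : List (Int × Int)) (goal : Int × Int) :
    ∀ (fuel : Nat) (q : List (Int × Int)) (vis : List Int),
      (∀ x ∈ q, Relation.ReflTransGen (pvStep cs) home x) →
      pvBfsLoop cs goal fuel q vis = "happy" → pvGS home cs goal := by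
  intro fuel
  induction fuel with
  | zero => intro q vis _ h; simp [pvBfsLoop_zero] at h
  | succ fuel ih =>
    intro q vis hinv h
    cases q with
    | nil => simp [pvBfsLoop_nilq] at h
    | cons v q' =>
      rw [pvBfsLoop_cons] at h
      by_cases hv : pvGetDist v goal ≤ pvDIST
      · exact ⟨v, hinv v (by simp), hv⟩
      · rw [if_neg hv] at h
        refine ih _ _ ?_ h
        intro x hx
        rcases pvScan_mem v cs (List.range cs.length) q' vis (by simp) x hx with hq | ⟨hc, hd⟩
        · exact hinv x (by simp [hq])
        · exact Relation.ReflTransGen.tail (hinv v (by simp)) ⟨hc, hd⟩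

theorem pvBfsLoop_sad (cs : List (Int × Int)) (goal : Int × Int) :
    ∀ (fuel : Nat) (q : List (Int × Int)) (vis : List Int),
      vis.length = cs.length → q.length + pvZ vis < fuel →
      pvBfsLoop cs goal fuel q vis = "sad" →
      ∀ x, pvRch cs q vis x → pvGetDist x goal ≤ pvDIST → False := by
  intro fuel
  induction fuel with
  | zero => intro q vis _ h; omega
  | succ fuel ih =>
    intro q vis hlen hm hsad x hx hd
    cases q with
    | nil => exact pvRch_nil cs vis x hx
    | cons v q' =>
      rw [pvBfsLoop_cons] at hsad
      by_cases hnv : pvGetDist v goal ≤ pvDIST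
      · rw [if_pos hnv] at hsad; simp at hsad
      · rw [if_neg hnv] at hsad
        have hmeas := pvScan_measure v cs (List.range cs.length) q' vis
          (by intro i hi; rw [hlen]; simpa using hi)
        have hlen' := pvScan_len v cs (List.range cs.length) q' vis
        rcases pvRch_transfer cs v q' vis x hx with rfl | hR
        · exact hnv hd
        · refine ih _ _ (by omega) ?_ hsad x hR hd
          simp only [List.length_cons] at hm
          omega

theorem pvRch_init (home : Int × Int) (cs : List (Int × Int)) (x : Int × Int)
    (h : Relation.ReflTransGen (pvStep cs) home x) :
    pvRch cs [home] (List.replicate cs.length 0) x := by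
  induction h with
  | refl => exact pvRch.base home (by simp)
  | tail hyz hstep ih =>
    rename_i y w
    rcases hstep with ⟨hw, hd⟩
    rcases List.mem_iff_getElem.1 hw with ⟨i, hi, hgi⟩
    have hgd : cs.getD i (0, 0) = w := by rw [List.getD_eq_getElem _ _ hi]; exact hgi
    have : pvRch cs [home] (List.replicate cs.length 0) (cs.getD i (0, 0)) := by
      refine pvRch.step y i ih hi ?_ (by rw [hgd]; exact hd)
      simp [List.getD, List.getElem?_replicate, hi]
    rwa [hgd] at this

theorem pvZ_replicate (n : Nat) : pvZ (List.replicate n 0) = n := by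
  induction n with
  | zero => rfl
  | succ n ih => simp [pvZ, List.replicate_succ, List.countP_cons] at *; omega

theorem pvA_iff (home : Int × Int) (cs : List (Int × Int)) (goal : Int × Int) :
    (bfs home cs goal = "happy" ↔ pvGS home cs goal) := by
  unfold bfs
  by_cases h0 : pvGetDist home goal ≤ pvDIST
  · rw [if_pos h0]
    exact ⟨fun _ => ⟨home, Relation.ReflTransGen.refl, h0⟩, fun _ => rfl⟩
  · simp only [if_neg h0]
    constructor
    · intro h
      exact pvBfsLoop_happy home cs goal _ _ _
        (by intro x hx; simp only [List.mem_singleton] at hx; subst hx; exact Relation.ReflTransGen.refl) h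
    · intro hgs
      rcases pvBfsLoop_out cs goal (cs.length + 2) [home] (List.replicate cs.length 0) with h | h
      · exact h
      · exfalso
        rcases hgs with ⟨x, hx, hd⟩
        exact pvBfsLoop_sad cs goal (cs.length + 2) [home] (List.replicate cs.length 0)
          (by simp) (by simp only [List.length_singleton, pvZ_replicate]; omega) h x (pvRch_init home cs x hx) hd

theorem pvA_sad (home : Int × Int) (cs : List (Int × Int)) (goal : Int × Int)
    (h : bfs home cs goal ≠ "happy") : bfs home cs goal = "sad" := by
  unfold bfs at *
  by_cases h0 : pvGetDist home goal ≤ pvDIST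
  · exact absurd (by rw [if_pos h0]) h
  · simp only [if_neg h0] at *
    rcases pvBfsLoop_out cs goal (cs.length + 2) [home] (List.replicate cs.length 0) with hh | hh
    · exact absurd hh h
    · exact hh

-- ---------- B-side: pair list form of the sweep ----------

def pvAdj (nodes : List (Int × Int)) (a b : Nat) : Prop :=
  a < nodes.length ∧ b < nodes.length ∧
    pvGetDist (nodes.getD a (0, 0)) (nodes.getD b (0, 0)) ≤ pvDIST

theorem pvAdj_symm (nodes : List (Int × Int)) : Symmetric (pvAdj nodes) := by
  intro a b ⟨h1, h2, h3⟩
  exact ⟨h2, h1, by rwa [pvGetDist_comm]⟩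

def pvPairs (n : Nat) : List (Nat × Nat) :=
  (List.range n).flatMap (fun i => (List.range' (i + 1) (n - (i + 1))).map (fun j => (i, j)))

def pvPairStep (nodes : List (Int × Int)) (st : List Int × Bool) (p : Nat × Nat) :
    List Int × Bool :=
  if pvGetDist (nodes.getD p.1 (0, 0)) (nodes.getD p.2 (0, 0)) ≤ pvDIST then
    if st.1.getD p.1 0 ≠ min (st.1.getD p.1 0) (st.1.getD p.2 0) ∨
        st.1.getD p.2 0 ≠ min (st.1.getD p.1 0) (st.1.getD p.2 0) then
      ((st.1.set p.1 (min (st.1.getD p.1 0) (st.1.getD p.2 0))).set p.2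
        (min (st.1.getD p.1 0) (st.1.getD p.2 0)), true)
    else st
  else st

theorem pvPairStep_cases (nodes : List (Int × Int)) (st : List Int × Bool) (p : Nat × Nat) :
    (pvGetDist (nodes.getD p.1 (0, 0)) (nodes.getD p.2 (0, 0)) ≤ pvDIST ∧
      (st.1.getD p.1 0 ≠ min (st.1.getD p.1 0) (st.1.getD p.2 0) ∨
        st.1.getD p.2 0 ≠ min (st.1.getD p.1 0) (st.1.getD p.2 0)) ∧
      pvPairStep nodes st p =
        ((st.1.set p.1 (min (st.1.getD p.1 0) (st.1.getD p.2 0))).set p.2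
          (min (st.1.getD p.1 0) (st.1.getD p.2 0)), true)) ∨
    (pvPairStep nodes st p = st ∧
      (pvGetDist (nodes.getD p.1 (0, 0)) (nodes.getD p.2 (0, 0)) ≤ pvDIST →
        st.1.getD p.1 0 = min (st.1.getD p.1 0) (st.1.getD p.2 0) ∧
          st.1.getD p.2 0 = min (st.1.getD p.1 0) (st.1.getD p.2 0))) := by
  by_cases hd : pvGetDist (nodes.getD p.1 (0, 0)) (nodes.getD p.2 (0, 0)) ≤ pvDIST
  · by_cases hup : st.1.getD p.1 0 ≠ min (st.1.getD p.1 0) (st.1.getD p.2 0) ∨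
        st.1.getD p.2 0 ≠ min (st.1.getD p.1 0) (st.1.getD p.2 0)
    · exact Or.inl ⟨hd, hup, by unfold pvPairStep; rw [if_pos hd, if_pos hup]⟩
    · push_neg at hup
      exact Or.inr ⟨by unfold pvPairStep; rw [if_pos hd, if_neg (by push_neg; exact hup)],
        fun _ => hup⟩
  · exact Or.inr ⟨by unfold pvPairStep; rw [if_neg hd], fun h => absurd h hd⟩

theorem pvFoldl_flatMap {α β σ : Type} (f : σ → β → σ) (g : α → List β) :
    ∀ (l : List α) (s : σ),
      (l.flatMap g).foldl f s = l.foldl (fun s a => (g a).foldl f s) s := by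
  intro l
  induction l with
  | nil => intro s; rfl
  | cons a t ih => intro s; simp [List.flatMap_cons, List.foldl_append, ih]

theorem pvSweep_eq (nodes : List (Int × Int)) (labels : List Int) :
    pvSweep nodes labels = (pvPairs nodes.length).foldl (pvPairStep nodes) (labels, false) := by
  unfold pvSweep pvPairs
  rw [pvFoldl_flatMap]
  congr 1
  funext st i
  rw [List.foldl_map]
  rfl

theorem pvPairs_mem (n : Nat) (p : Nat × Nat) :
    p ∈ pvPairs n ↔ p.1 < p.2 ∧ p.2 < n := by
  rcases p with ⟨a, b⟩
  simp only [pvPairs, List.mem_flatMap, List.mem_map, List.mem_range, List.mem_range'_1]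
  constructor
  · rintro ⟨i, hi, j, hj, h⟩
    rw [Prod.ext_iff] at h
    simp only at h
    obtain ⟨rfl, rfl⟩ := h
    omega
  · rintro ⟨h1, h2⟩
    exact ⟨a, by omega, b, by omega, rfl⟩

-- ---------- B-side: invariants of the sweep ----------

def pvNN (l : List Int) : Prop := ∀ i, 0 ≤ l.getD i 0

def pvInv (nodes : List (Int × Int)) (l : List Int) : Prop :=
  l.length = nodes.length ∧
    ∀ i, i < nodes.length →
      0 ≤ l.getD i 0 ∧ (l.getD i 0).toNat < nodes.length ∧
        Relation.ReflTransGen (pvAdj nodes) i (l.getD i 0).toNat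

theorem pvNN_of_inv (nodes : List (Int × Int)) (l : List Int) (h : pvInv nodes l) :
    pvNN l := by
  intro i
  by_cases hi : i < nodes.length
  · exact (h.2 i hi).1
  · rw [pvGetD_oob l i (by rw [h.1]; omega)]

theorem pvStep_inv (nodes : List (Int × Int)) (st : List Int × Bool) (p : Nat × Nat)
    (hp1 : p.1 < nodes.length) (hp2 : p.2 < nodes.length)
    (h : pvInv nodes st.1) : pvInv nodes (pvPairStep nodes st p).1 := by
  rcases pvPairStep_cases nodes st p with ⟨hd, _, heq⟩ | ⟨heq, _⟩
  · rw [heq]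
    have hlen : st.1.length = nodes.length := h.1
    have hadj12 : pvAdj nodes p.1 p.2 := ⟨hp1, hp2, hd⟩
    have h1 := h.2 p.1 hp1
    have h2 := h.2 p.2 hp2
    have hconnm : ∀ k, k = p.1 ∨ k = p.2 →
        0 ≤ min (st.1.getD p.1 0) (st.1.getD p.2 0) ∧
          (min (st.1.getD p.1 0) (st.1.getD p.2 0)).toNat < nodes.length ∧
          Relation.ReflTransGen (pvAdj nodes) k
            (min (st.1.getD p.1 0) (st.1.getD p.2 0)).toNat := by
      intro k hk
      rcases min_choice (st.1.getD p.1 0) (st.1.getD p.2 0) with hmc | hmc <;> rw [hmc]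
      · refine ⟨h1.1, h1.2.1, ?_⟩
        rcases hk with rfl | rfl
        · exact h1.2.2
        · exact Relation.ReflTransGen.head (pvAdj_symm nodes hadj12) h1.2.2
      · refine ⟨h2.1, h2.2.1, ?_⟩
        rcases hk with rfl | rfl
        · exact Relation.ReflTransGen.head hadj12 h2.2.2
        · exact h2.2.2
    constructor
    · simp [hlen]
    · intro i hi
      by_cases hi2 : i = p.2
      · subst hi2
        rw [pvGetD_set_self _ _ _ (by rw [List.length_set, hlen]; omega)]
        exact hconnm _ (Or.inr rfl)
      · rw [pvGetD_set_ne _ _ _ _ (fun hh => hi2 hh.symm)]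
        by_cases hi1 : i = p.1
        · subst hi1
          rw [pvGetD_set_self _ _ _ (by rw [hlen]; omega)]
          exact hconnm _ (Or.inl rfl)
        · rw [pvGetD_set_ne _ _ _ _ (fun hh => hi1 hh.symm)]
          exact h.2 i hi
  · rw [heq]
    exact h

theorem pvFold_inv (nodes : List (Int × Int)) :
    ∀ (ps : List (Nat × Nat)) (st : List Int × Bool),
      (∀ p ∈ ps, p.1 < nodes.length ∧ p.2 < nodes.length) →
      pvInv nodes st.1 → pvInv nodes (ps.foldl (pvPairStep nodes) st).1 := by
  intro ps
  induction ps with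
  | nil => intro st _ h; exact h
  | cons p pt ih =>
    intro st hb h
    simp only [List.foldl_cons]
    exact ih _ (fun q hq => hb q (by simp [hq]))
      (pvStep_inv nodes st p (hb p (by simp)).1 (hb p (by simp)).2 h)

def pvMu (l : List Int) : Nat := (l.map Int.toNat).sum

theorem pvMu_set_le (l : List Int) : ∀ (i : Nat) (m : Int),
    m.toNat ≤ (l.getD i 0).toNat → pvMu (l.set i m) ≤ pvMu l := by
  induction l with
  | nil => intro i m _; simp [pvMu]
  | cons a t ih =>
    intro i m h
    cases i with
    | zero =>
      simp only [List.getD_cons_zero] at h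
      simp only [List.set_cons_zero, pvMu, List.map_cons, List.sum_cons]
      omega
    | succ i =>
      simp only [List.getD_cons_succ] at h
      have := ih i m h
      simp only [List.set_cons_succ, pvMu, List.map_cons, List.sum_cons] at *
      omega

theorem pvMu_set_lt (l : List Int) : ∀ (i : Nat) (m : Int),
    m.toNat < (l.getD i 0).toNat → pvMu (l.set i m) < pvMu l := by
  induction l with
  | nil =>
    intro i m h
    simp [List.getD] at h
  | cons a t ih =>
    intro i m h
    cases i with
    | zero =>
      simp only [List.getD_cons_zero] at h
      simp only [List.set_cons_zero, pvMu, List.map_cons, List.sum_cons]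
      omega
    | succ i =>
      simp only [List.getD_cons_succ] at h
      have := ih i m h
      simp only [List.set_cons_succ, pvMu, List.map_cons, List.sum_cons] at *
      omega

theorem pvStep_mu_le (nodes : List (Int × Int)) (st : List Int × Bool) (p : Nat × Nat)
    (hne : p.1 ≠ p.2) : pvMu (pvPairStep nodes st p).1 ≤ pvMu st.1 := by
  rcases pvPairStep_cases nodes st p with ⟨_, _, heq⟩ | ⟨heq, _⟩
  · rw [heq]
    refine le_trans (pvMu_set_le _ _ _ ?_) (pvMu_set_le _ _ _ ?_)
    · rw [pvGetD_set_ne _ _ _ _ hne]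
      exact Int.toNat_le_toNat (min_le_right _ _)
    · exact Int.toNat_le_toNat (min_le_left _ _)
  · rw [heq]

theorem pvFold_mu_le (nodes : List (Int × Int)) :
    ∀ (ps : List (Nat × Nat)) (st : List Int × Bool),
      (∀ p ∈ ps, p.1 ≠ p.2) →
      pvMu (ps.foldl (pvPairStep nodes) st).1 ≤ pvMu st.1 := by
  intro ps
  induction ps with
  | nil => intro st _; exact le_refl _
  | cons p pt ih =>
    intro st hb
    simp only [List.foldl_cons]
    exact le_trans (ih _ (fun q hq => hb q (by simp [hq])))
      (pvStep_mu_le nodes st p (hb p (by simp)))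

theorem pvStep_fired (nodes : List (Int × Int)) (st : List Int × Bool) (p : Nat × Nat)
    (hne : p.1 ≠ p.2) (hNN : pvNN st.1)
    (h2 : (pvPairStep nodes st p).2 = true) (h1 : st.2 = false) :
    pvMu (pvPairStep nodes st p).1 < pvMu st.1 := by
  rcases pvPairStep_cases nodes st p with ⟨_, hup, heq⟩ | ⟨heq, _⟩
  · rw [heq]
    dsimp only
    have hm0 : 0 ≤ min (st.1.getD p.1 0) (st.1.getD p.2 0) := le_min (hNN p.1) (hNN p.2)
    rcases hup with hq | hq
    · have hlt : min (st.1.getD p.1 0) (st.1.getD p.2 0) < st.1.getD p.1 0 :=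
        lt_of_le_of_ne (min_le_left _ _) hq.symm
      have hA : pvMu (st.1.set p.1 (min (st.1.getD p.1 0) (st.1.getD p.2 0))) < pvMu st.1 := by
        apply pvMu_set_lt
        omega
      have hB : pvMu ((st.1.set p.1 (min (st.1.getD p.1 0) (st.1.getD p.2 0))).set p.2
          (min (st.1.getD p.1 0) (st.1.getD p.2 0))) ≤
          pvMu (st.1.set p.1 (min (st.1.getD p.1 0) (st.1.getD p.2 0))) := by
        apply pvMu_set_le
        rw [pvGetD_set_ne _ _ _ _ hne]
        exact Int.toNat_le_toNat (min_le_right _ _)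
      omega
    · have hlt : min (st.1.getD p.1 0) (st.1.getD p.2 0) < st.1.getD p.2 0 :=
        lt_of_le_of_ne (min_le_right _ _) hq.symm
      have hA : pvMu (st.1.set p.1 (min (st.1.getD p.1 0) (st.1.getD p.2 0))) ≤ pvMu st.1 := by
        apply pvMu_set_le
        exact Int.toNat_le_toNat (min_le_left _ _)
      have hB : pvMu ((st.1.set p.1 (min (st.1.getD p.1 0) (st.1.getD p.2 0))).set p.2
          (min (st.1.getD p.1 0) (st.1.getD p.2 0))) <
          pvMu (st.1.set p.1 (min (st.1.getD p.1 0) (st.1.getD p.2 0))) := by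
        apply pvMu_set_lt
        rw [pvGetD_set_ne _ _ _ _ hne]
        omega
      omega
  · rw [heq] at h2
    rw [h1] at h2
    simp at h2

theorem pvChanged_mono (nodes : List (Int × Int)) :
    ∀ (qs : List (Nat × Nat)) (s : List Int × Bool), s.2 = true →
      (qs.foldl (pvPairStep nodes) s).2 = true := by
  intro qs
  induction qs with
  | nil => intro s hs; exact hs
  | cons q qt ihq =>
    intro s hs
    simp only [List.foldl_cons]
    apply ihq
    rcases pvPairStep_cases nodes s q with ⟨_, _, heq⟩ | ⟨heq, _⟩
    · simp [heq]
    · rw [heq]; exact hs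

theorem pvFold_mu_lt (nodes : List (Int × Int)) :
    ∀ (ps : List (Nat × Nat)) (st : List Int × Bool),
      (∀ p ∈ ps, p.1 ≠ p.2) → pvNN st.1 → st.2 = false →
      (ps.foldl (pvPairStep nodes) st).2 = true →
      pvMu (ps.foldl (pvPairStep nodes) st).1 < pvMu st.1 := by
  intro ps
  induction ps with
  | nil => intro st _ _ h1 h2; simp only [List.foldl_nil] at h2; rw [h1] at h2; simp at h2
  | cons p pt ih =>
    intro st hb hNN h1 h2
    simp only [List.foldl_cons] at h2 ⊢
    by_cases hs : (pvPairStep nodes st p).2 = true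
    · have hlt := pvStep_fired nodes st p (hb p (by simp)) hNN hs h1
      have hle := pvFold_mu_le nodes pt (pvPairStep nodes st p)
        (fun q hq => hb q (by simp [hq]))
      omega
    · rcases pvPairStep_cases nodes st p with ⟨_, _, heq⟩ | ⟨heq, _⟩
      · rw [heq] at hs; simp at hs
      · rw [heq] at h2 ⊢
        exact ih st (fun q hq => hb q (by simp [hq])) hNN h1 h2

theorem pvFold_nochange (nodes : List (Int × Int)) :
    ∀ (ps : List (Nat × Nat)) (st : List Int × Bool),
      (ps.foldl (pvPairStep nodes) st).2 = false →
      st.2 = false ∧ (ps.foldl (pvPairStep nodes) st).1 = st.1 ∧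
        ∀ p ∈ ps, pvGetDist (nodes.getD p.1 (0, 0)) (nodes.getD p.2 (0, 0)) ≤ pvDIST →
          st.1.getD p.1 0 = st.1.getD p.2 0 := by
  intro ps
  induction ps with
  | nil => intro st h; exact ⟨h, rfl, by simp⟩
  | cons p pt ih =>
    intro st h
    simp only [List.foldl_cons] at h ⊢
    rcases pvPairStep_cases nodes st p with ⟨_, _, heq⟩ | ⟨heq, him⟩
    · rw [heq] at h
      rw [pvChanged_mono nodes pt _ rfl] at h
      simp at h
    · rw [heq] at h
      rcases ih st h with ⟨hst2, hfix, hpairs⟩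
      refine ⟨hst2, by rw [heq]; exact hfix, ?_⟩
      intro q hq hd
      rcases List.mem_cons.1 hq with rfl | hq'
      · exact (him hd).1.trans (him hd).2.symm
      · exact hpairs q hq' hd

-- ---------- B-side: the loop reaches a stable labelling ----------

def pvStable (nodes : List (Int × Int)) (l : List Int) : Prop :=
  ∀ a b, pvAdj nodes a b → l.getD a 0 = l.getD b 0

theorem pvSweep_stable (nodes : List (Int × Int)) (l : List Int)
    (h : (pvSweep nodes l).2 = false) : pvStable nodes l := by
  rw [pvSweep_eq] at h
  rcases pvFold_nochange nodes (pvPairs nodes.length) (l, false) h with ⟨_, _, hpairs⟩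
  intro a b ⟨ha, hb, hd⟩
  rcases Nat.lt_trichotomy a b with hab | hab | hab
  · exact hpairs (a, b) ((pvPairs_mem _ _).2 ⟨hab, hb⟩) hd
  · rw [hab]
  · exact (hpairs (b, a) ((pvPairs_mem _ _).2 ⟨hab, ha⟩) (by rwa [pvGetDist_comm])).symm

theorem pvLp_spec (nodes : List (Int × Int)) :
    ∀ (fuel : Nat) (l : List Int), pvInv nodes l → pvMu l < fuel →
      pvInv nodes (pvLpLoop nodes fuel l) ∧ pvStable nodes (pvLpLoop nodes fuel l) := by
  intro fuel
  induction fuel with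
  | zero => intro l _ h; omega
  | succ fuel ih =>
    intro l hinv hmu
    unfold pvLpLoop
    by_cases hch : (pvSweep nodes l).2
    · simp only [hch, if_true]
      have hbnds : ∀ p ∈ pvPairs nodes.length, p.1 < nodes.length ∧ p.2 < nodes.length := by
        intro p hp
        have := (pvPairs_mem _ _).1 hp
        omega
      have hne : ∀ p ∈ pvPairs nodes.length, p.1 ≠ p.2 := by
        intro p hp
        have := (pvPairs_mem _ _).1 hp
        omega
      have hinv' : pvInv nodes (pvSweep nodes l).1 := by
        rw [pvSweep_eq]
        exact pvFold_inv nodes _ _ hbnds hinv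
      have hmu' : pvMu (pvSweep nodes l).1 < pvMu l := by
        rw [pvSweep_eq] at hch ⊢
        exact pvFold_mu_lt nodes _ _ hne (pvNN_of_inv nodes l hinv) rfl hch
      exact ih _ hinv' (by omega)
    · simp only [Bool.not_eq_true] at hch
      simp only [hch, if_false]
      exact ⟨hinv, pvSweep_stable nodes l hch⟩

theorem pvInit_inv (nodes : List (Int × Int)) (h2 : 2 ≤ nodes.length) :
    pvInv nodes ((List.range nodes.length).map (fun i : Nat => (i : Int))) := by
  constructor
  · simp
  · intro i hi
    have hg : ((List.range nodes.length).map (fun i : Nat => (i : Int))).getD i 0 = (i : Int) := by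
      rw [List.getD_eq_getElem _ _ (by simpa using hi)]
      simp only [List.getElem_map, List.getElem_range]
    rw [hg]
    simp only [Int.toNat_natCast]
    exact ⟨by positivity, hi, Relation.ReflTransGen.refl⟩

theorem pvRange_sum_le (n : Nat) : (List.range n).sum ≤ n * n := by
  induction n with
  | zero => simp
  | succ n ih =>
    rw [List.range_succ, List.sum_append]
    simp only [List.sum_cons, List.sum_nil]
    nlinarith

theorem pvInit_mu (n : Nat) : pvMu ((List.range n).map (fun i : Nat => (i : Int))) ≤ n * n := by
  unfold pvMu
  rw [List.map_map]
  simp only [Function.comp_def, Int.toNat_natCast, List.map_id']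
  exact pvRange_sum_le n

-- ---------- B-side: labels ↔ connectivity ↔ the common spec ----------

theorem pvConn_label (nodes : List (Int × Int)) (l : List Int) (hst : pvStable nodes l)
    (a b : Nat) (h : Relation.ReflTransGen (pvAdj nodes) a b) : l.getD a 0 = l.getD b 0 := by
  induction h with
  | refl => rfl
  | tail _ hadj ih => exact ih.trans (hst _ _ hadj)

theorem pvLabel_iff (nodes : List (Int × Int)) (l : List Int)
    (hinv : pvInv nodes l) (hst : pvStable nodes l) (h2 : 2 ≤ nodes.length) :
    (l.getD 0 0 = l.getD 1 0 ↔ Relation.ReflTransGen (pvAdj nodes) 0 1) := by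
  constructor
  · intro h
    have h0 := hinv.2 0 (by omega)
    have h1 := hinv.2 1 (by omega)
    have hv : (l.getD 0 0).toNat = (l.getD 1 0).toNat := by rw [h]
    exact Relation.ReflTransGen.trans h0.2.2
      (hv ▸ (Relation.ReflTransGen.symmetric (pvAdj_symm nodes)) h1.2.2)
  · exact pvConn_label nodes l hst 0 1

def pvAdjS (nodes : List (Int × Int)) (a b : Nat) : Prop :=
  pvAdj nodes a b ∧ a ≠ 1 ∧ b ≠ 1

theorem pvFH (nodes : List (Int × Int)) :
    ∀ a, Relation.ReflTransGen (pvAdj nodes) a 1 →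
      a = 1 ∨ ∃ b, b ≠ 1 ∧ Relation.ReflTransGen (pvAdjS nodes) a b ∧ pvAdj nodes b 1 := by
  intro a h
  induction h using Relation.ReflTransGen.head_induction_on with
  | refl => exact Or.inl rfl
  | head hac hcb ih =>
    rename_i a' c
    by_cases ha1 : a' = 1
    · exact Or.inl ha1
    · by_cases hc1 : c = 1
      · exact Or.inr ⟨a', ha1, Relation.ReflTransGen.refl, hc1 ▸ hac⟩
      · rcases ih with rfl | ⟨b, hb1, hrtg, hadj⟩
        · exact absurd rfl hc1
        · exact Or.inr ⟨b, hb1,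
            Relation.ReflTransGen.head ⟨hac, ha1, hc1⟩ hrtg, hadj⟩

theorem pvT2a (home : Int × Int) (cs : List (Int × Int)) (goal : Int × Int) (b : Nat)
    (h : Relation.ReflTransGen (pvAdjS (home :: goal :: cs)) 0 b) :
    Relation.ReflTransGen (pvStep cs) home ((home :: goal :: cs).getD b (0, 0)) := by
  induction h with
  | refl => exact Relation.ReflTransGen.refl
  | @tail y k hrt hadj ih =>
    rcases hadj with ⟨⟨hy, hk, hd⟩, hy1, hk1⟩
    rcases k with _ | k
    · exact Relation.ReflTransGen.refl
    rcases k with _ | k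
    · exact absurd rfl hk1
    · have hkc : k < cs.length := by simpa using hk
      have hgd : (home :: goal :: cs).getD (k + 2) (0, 0) = cs.getD k (0, 0) := by
        simp [List.getD]
      refine Relation.ReflTransGen.tail ih ⟨?_, ?_⟩
      · rw [hgd]; exact pvGetD_mem _ _ _ hkc
      · exact hd

theorem pvT2 (home : Int × Int) (cs : List (Int × Int)) (goal : Int × Int)
    (h : Relation.ReflTransGen (pvAdj (home :: goal :: cs)) 0 1) : pvGS home cs goal := by
  rcases pvFH (home :: goal :: cs) 0 h with h01 | ⟨b, hb1, hrtg, hadj⟩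
  · exact absurd h01 (by omega)
  · refine ⟨(home :: goal :: cs).getD b (0, 0), pvT2a home cs goal b hrtg, ?_⟩
    have := hadj.2.2
    simpa [List.getD] using this

theorem pvT1a (home : Int × Int) (cs : List (Int × Int)) (goal : Int × Int) (x : Int × Int)
    (h : Relation.ReflTransGen (pvStep cs) home x) :
    ∃ k, k < (home :: goal :: cs).length ∧ k ≠ 1 ∧
      (home :: goal :: cs).getD k (0, 0) = x ∧
      Relation.ReflTransGen (pvAdj (home :: goal :: cs)) 0 k := by
  induction h with
  | refl => exact ⟨0, by simp, by omega, rfl, Relation.ReflTransGen.refl⟩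
  | @tail y w hrt hstep ih =>
    rcases hstep with ⟨hw, hd⟩
    rcases ih with ⟨k, hk, hk1, hky, hconn⟩
    rcases List.mem_iff_getElem.1 hw with ⟨m, hm, hgm⟩
    have hgd : (home :: goal :: cs).getD (m + 2) (0, 0) = w := by
      simp only [List.getD]
      rw [show (home :: goal :: cs)[m+2]? = cs[m]? by simp]
      rw [List.getElem?_eq_getElem hm]
      simpa using hgm
    refine ⟨m + 2, by simpa using hm, by omega, hgd, ?_⟩
    refine Relation.ReflTransGen.tail hconn ⟨hk, by simpa using hm, ?_⟩
    rw [hky, hgd]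
    exact hd

theorem pvT1 (home : Int × Int) (cs : List (Int × Int)) (goal : Int × Int)
    (h : pvGS home cs goal) : Relation.ReflTransGen (pvAdj (home :: goal :: cs)) 0 1 := by
  rcases h with ⟨x, hx, hd⟩
  rcases pvT1a home cs goal x hx with ⟨k, hk, _, hky, hconn⟩
  refine Relation.ReflTransGen.tail hconn ⟨hk, by simp, ?_⟩
  rw [hky]
  simpa [List.getD] using hd

theorem pvBfsAlt_eq (home : Int × Int) (cs : List (Int × Int)) (goal : Int × Int) :
    bfs_alt home cs goal =
      if (pvLpLoop (home :: goal :: cs)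
            ((home :: goal :: cs).length * (home :: goal :: cs).length + 1)
            ((List.range (home :: goal :: cs).length).map (fun i : Nat => (i : Int)))).getD 0 0 =
          (pvLpLoop (home :: goal :: cs)
            ((home :: goal :: cs).length * (home :: goal :: cs).length + 1)
            ((List.range (home :: goal :: cs).length).map (fun i : Nat => (i : Int)))).getD 1 0
      then "happy" else "sad" := rfl

theorem pvB_iff (home : Int × Int) (cs : List (Int × Int)) (goal : Int × Int) :
    (bfs_alt home cs goal = "happy" ↔ pvGS home cs goal) := by
  rw [pvBfsAlt_eq]
  set nodes := home :: goal :: cs with hnodes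
  have h2 : 2 ≤ nodes.length := by simp [hnodes]
  have hspec := pvLp_spec nodes (nodes.length * nodes.length + 1)
    ((List.range nodes.length).map (fun i : Nat => (i : Int)))
    (pvInit_inv nodes h2) (by have := pvInit_mu nodes.length; omega)
  have hlab := pvLabel_iff nodes _ hspec.1 hspec.2 h2
  constructor
  · intro h
    split at h
    · rename_i heq
      exact pvT2 home cs goal (hlab.1 heq)
    · simp at h
  · intro hgs
    rw [if_pos (hlab.2 (pvT1 home cs goal hgs))]

theorem pvIte_sad {c : Prop} [Decidable c]
    (h : (if c then "happy" else "sad") ≠ "happy") :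
    (if c then "happy" else "sad") = "sad" := by
  split
  · rename_i hc; exact absurd (if_pos hc) h
  · rfl

theorem pvB_sad (home : Int × Int) (cs : List (Int × Int)) (goal : Int × Int)
    (h : bfs_alt home cs goal ≠ "happy") : bfs_alt home cs goal = "sad" := by
  rw [pvBfsAlt_eq] at h ⊢
  exact pvIte_sad h

-- ===== VERDICT (by name: the statement is the Claim_ definition above) =====
theorem bfs_spec : Claim_equal_bfs := by
  intro home cs goal _
  unfold Spec_bfs
  by_cases h : pvGS home cs goal
  · rw [(pvA_iff home cs goal).2 h, ((pvB_iff home cs goal).2 h).symm]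
  · have ha : bfs home cs goal ≠ "happy" := fun he => h ((pvA_iff home cs goal).1 he)
    have hb : bfs_alt home cs goal ≠ "happy" := fun he => h ((pvB_iff home cs goal).1 he)
    rw [pvA_sad home cs goal ha, pvB_sad home cs goal hb]
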